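-- pv_equiv track=rewrite | github.com/factorem1337/NPA | npa.py | generate_string_term_set
-- ===== SOURCE A (Python) =====
-- from itertools import product
--
-- def simplify_product_advanced(product_str):
--     """
--     Simplifies an operator product string with correct commutation rules.
--     - Operators from different parties (A, B) commute.
--     - Operators from the same party (A1, A2) DO NOT commute.
--     """
--     operators = [op for op in product_str.split() if op != "Id"]
--     if not operators:
--         return "Id"
--
--     # 1. Group operators by party, maintaining original relative order.
--     party_groups = {}
--     for op in operators:
--         party = op[0]
--         if party not in party_groups:
--             party_groups[party] = []
--         party_groups[party].append(op)
--
--     # 2. For each party, simplify adjacent O^2=I pairs iteratively.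
--     for party, op_list in party_groups.items():
--         simplified = True
--         while simplified:
--             simplified = False
--             if len(op_list) < 2:
--                 break
--             next_op_list = []
--             i = 0
--             while i < len(op_list):
--                 if i + 1 < len(op_list) and op_list[i] == op_list[i+1]:
--                     i += 2
--                     simplified = True
--                 else:
--                     next_op_list.append(op_list[i])
--                     i += 1
--             op_list = next_op_list
--         party_groups[party] = op_list
--
--     # 3. Recombine party groups in canonical order (A then B).
--     final_ops = []
--     for party in sorted(party_groups.keys()):
--         final_ops.extend(party_groups[party])
--
--     if not final_ops:
--         return "Id"
--     return " ".join(final_ops)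
--
-- def generate_string_term_set(base_operators_by_party, term_str):
--     """Generates the operator set for a specific string term like 'AB' or 'AAB'."""
--     operator_pools = []
--     for party_char in term_str:
--         if party_char in base_operators_by_party:
--             operator_pools.append(base_operators_by_party[party_char])
--         else:
--             return set()
--
--     term_set = set()
--     for combo in product(*operator_pools):
--         product_str = " ".join(combo)
--         simplified = simplify_product_advanced(product_str)
--         term_set.add(simplified)
--
--     return term_set
-- ===== SOURCE B (Python) =====
-- def _simplify(combo):
--     ops = [t for t in " ".join(combo).split() if t != "Id"]
--     parts = []
--     for party in sorted({t[0] for t in ops}):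
--         stack = []
--         for t in ops:
--             if t[0] != party:
--                 continue
--             if stack and stack[-1] == t:
--                 stack.pop()
--             else:
--                 stack.append(t)
--         parts += stack
--     return " ".join(parts) if parts else "Id"
--
--
-- def generate_string_term_set(base_operators_by_party, term_str):
--     if not all(c in base_operators_by_party for c in term_str):
--         return set()
--     combos = [[]]
--     for c in term_str:
--         pool = base_operators_by_party[c]
--         combos = [pc + [op] for pc in combos for op in pool]
--     return {_simplify(combo) for combo in combos}
-- ===== Notes on version B (the rewrite author's own statement) =====
-- stated objective: simpler
-- what changed: Each party's operator list is freely reduced in a single left-to-right stack pass (pop on a repeated top, else push) instead of A's repeated whole-list rescans until a fixpoint, and the grouping dict is replaced by filtering the token list per sorted party; the combo enumeration is an iterative left-to-right product extension with a single up-front membership check instead of itertools.product with an early-return pool loop.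
import Mathlib
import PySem

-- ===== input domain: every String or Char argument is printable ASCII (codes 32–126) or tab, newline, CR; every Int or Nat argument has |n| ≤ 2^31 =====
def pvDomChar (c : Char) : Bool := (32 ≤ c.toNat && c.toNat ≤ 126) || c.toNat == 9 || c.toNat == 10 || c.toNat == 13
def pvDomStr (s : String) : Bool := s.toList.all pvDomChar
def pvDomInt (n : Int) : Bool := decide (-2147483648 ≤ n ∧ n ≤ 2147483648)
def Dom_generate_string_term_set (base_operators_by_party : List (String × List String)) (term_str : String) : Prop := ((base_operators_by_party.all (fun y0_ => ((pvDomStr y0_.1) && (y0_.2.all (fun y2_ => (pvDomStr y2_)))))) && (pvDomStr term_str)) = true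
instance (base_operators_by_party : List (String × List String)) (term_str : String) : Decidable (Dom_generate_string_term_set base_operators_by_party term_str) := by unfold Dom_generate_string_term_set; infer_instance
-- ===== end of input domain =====

-- B is simpler: the per-party reduction is a single left-to-right stack pass instead of A's
-- repeated rescans to a fixpoint, and the grouping dict disappears (filter per sorted party).

-- ===== PORT A =====

-- op[0]: exact because every token produced by str.split() is nonempty (shared by both ports)
def partyOf (op : String) : Char := op.toList.headD ' '

-- one rescan 'while i < len(op_list)': returns (next_op_list, simplified)
def passA : List String → List String × Bool
  | [] => ([], false)
  | [x] => ([x], false)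
  | a :: b :: t =>
    if a == b then ((passA t).1, true)
    else ((a :: (passA (b :: t)).1), (passA (b :: t)).2)

-- used by loopA's termination: a pass that found a pair shortened the list
theorem passA_len : ∀ l : List String, (passA l).1.length ≤ l.length ∧
    ((passA l).2 = true → (passA l).1.length < l.length)
  | [] => by simp [passA]
  | [x] => by simp [passA]
  | a :: b :: t => by
    by_cases h : a = b
    · have hbe : (a == b) = true := beq_iff_eq.mpr h
      rw [show passA (a :: b :: t) = ((passA t).1, true) from by simp [passA, hbe]]
      have h1 := (passA_len t).1
      refine ⟨?_, fun _ => ?_⟩ <;> · simp only [List.length_cons] at h1 ⊢; omega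
    · have hbe : (a == b) = false := by simp [h]
      rw [show passA (a :: b :: t) = (a :: (passA (b :: t)).1, (passA (b :: t)).2) from by
        simp [passA, hbe]]
      have h1 := (passA_len (b :: t)).1
      refine ⟨?_, fun hs => ?_⟩
      · simp only [List.length_cons] at h1 ⊢; omega
      · have h2 := (passA_len (b :: t)).2 hs
        simp only [List.length_cons] at h1 h2 ⊢; omega

-- the outer 'while simplified' loop of step 2
def loopA (l : List String) : List String :=
  if l.length < 2 then l
  else
    if (passA l).2 then loopA (passA l).1 else (passA l).1
termination_by l.length
decreasing_by exact (passA_len l).2 (by assumption)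

def simplify_product_advanced (product_str : String) : String :=
  let operators := (PySem.Str.split₀ product_str).filter (fun op => op != "Id")
  if operators = [] then "Id"
  else
    -- step 1: group by party (the "if party not in …: …= []; append" pair is modify with default [])
    let party_groups := operators.foldl
      (fun d op => d.modify (partyOf op) [] (fun v => v ++ [op])) PySem.Dict.empty
    -- step 2: for each party, simplify to the fixpoint and store back
    let party_groups2 := party_groups.items.foldl
      (fun d kv => d.insert kv.1 (loopA kv.2)) party_groups
    -- step 3: recombine in sorted party order
    let final_ops := (PySem.List.sorted party_groups2.keys (fun x => x) false).foldl
      (fun acc p => acc ++ party_groups2.getD p []) []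
    if final_ops = [] then "Id" else PySem.Str.join " " final_ops

-- itertools.product(*pools), tuples as lists, leftmost index varies slowest
def pyProd : List (List String) → List (List String)
  | [] => [[]]
  | p :: ps => p.flatMap (fun x => (pyProd ps).map (fun c => x :: c))

-- the pools loop with its early 'return set()' (none = that early return)
def buildPools (d : PySem.Dict String (List String)) : List Char → Option (List (List String))
  | [] => some []
  | c :: cs =>
    match d.get? (String.ofList [c]) with
    | some pool => (buildPools d cs).map (fun ps => pool :: ps)
    | none => none

def generate_string_term_set (base_operators_by_party : List (String × List String)) (term_str : String) : List String :=
  let d := PySem.Dict.mk base_operators_by_party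
  match buildPools d term_str.toList with
  | none => []
  | some pools =>
    (pyProd pools).foldl
      (fun s combo => PySem.Set.add s (simplify_product_advanced (PySem.Str.join " " combo)))
      PySem.Set.empty

-- ===== PORT B =====

-- one stack step: pop on a repeat of the top, else push (top at the head; reversed at the end)
def stepB (st : List String) (op : String) : List String :=
  match st with
  | t :: r => if t == op then r else op :: t :: r
  | [] => [op]

def simplifyB (combo : List String) : String :=
  let ops := (PySem.Str.split₀ (PySem.Str.join " " combo)).filter (fun t => t != "Id")
  let parts := (PySem.List.sorted (PySem.Set.ofList (ops.map partyOf)) (fun x => x) false).foldl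
    (fun acc party =>
      acc ++ (ops.foldl (fun st t => if partyOf t != party then st else stepB st t) []).reverse)
    []
  if parts = [] then "Id" else PySem.Str.join " " parts

def generate_string_term_set_alt (base_operators_by_party : List (String × List String)) (term_str : String) : List String :=
  let d := PySem.Dict.mk base_operators_by_party
  if term_str.toList.all (fun c => d.contains (String.ofList [c])) then
    let combos := term_str.toList.foldl
      (fun cs c => cs.flatMap (fun pc => (d.getD (String.ofList [c]) []).map (fun op => pc ++ [op])))
      [[]]
    PySem.Set.ofList (combos.map simplifyB)
  else []

-- ===== PRECONDITION & SPEC =====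
def Spec_generate_string_term_set (base_operators_by_party : List (String × List String)) (term_str : String) (out : List String) : Prop := out = generate_string_term_set_alt base_operators_by_party term_str
instance (base_operators_by_party : List (String × List String)) (term_str : String) (out : List String) : Decidable (Spec_generate_string_term_set base_operators_by_party term_str out) := by unfold Spec_generate_string_term_set; infer_instance

-- ===== CLAIM (what is proved, stated in full; the proofs are below) =====
def Claim_equal_generate_string_term_set : Prop := ∀ (base_operators_by_party : List (String × List String)) (term_str : String), Dom_generate_string_term_set base_operators_by_party term_str → Spec_generate_string_term_set base_operators_by_party term_str (generate_string_term_set base_operators_by_party term_str)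

-- ===== LEMMAS AND PROOFS =====

-- no two equal adjacent entries (the invariant both reductions preserve)
def NR : List String → Prop
  | [] => True
  | [_] => True
  | a :: b :: t => a ≠ b ∧ NR (b :: t)

theorem NR_tail : ∀ {a : String} {t : List String}, NR (a :: t) → NR t
  | _, [], _ => trivial
  | _, _ :: _, h => h.2

theorem NR_head {a : String} {t : List String} (h : NR (a :: t)) : ∀ b ∈ t.head?, a ≠ b := by
  cases t with
  | nil => simp
  | cons b r =>
    intro x hx
    have hxb : x = b := by simpa [eq_comm] using hx
    subst hxb
    exact h.1

-- the stack never holds two equal adjacent entries, and stepB keeps it so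
theorem stepB_chain : ∀ {st : List String}, NR st → ∀ op : String, NR (stepB st op)
  | [], _, op => trivial
  | t :: r, h, op => by
    by_cases he : t = op
    · have hbe : (t == op) = true := beq_iff_eq.mpr he
      simp only [stepB, hbe, if_true]
      exact NR_tail h
    · have hbe : (t == op) = false := beq_eq_false_iff_ne.mpr he
      simp only [stepB, hbe, Bool.false_eq_true, if_false]
      exact ⟨fun e => he e.symm, h⟩

-- on a repeat-free stack, consuming the same op twice is the identity
theorem stepB_stepB : ∀ {st : List String}, NR st → ∀ op : String,
    stepB (stepB st op) op = st
  | [], _, op => by simp [stepB]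
  | t :: r, h, op => by
    by_cases he : t = op
    · subst he
      cases r with
      | nil => simp [stepB]
      | cons u r' =>
        have hbe : (u == t) = false := beq_eq_false_iff_ne.mpr (fun e => h.1 e.symm)
        simp [stepB, hbe]
    · have hbe : (t == op) = false := beq_eq_false_iff_ne.mpr he
      simp [stepB, hbe]

-- one rescan pass of A does not change the stack reduction
theorem passA_foldl : ∀ (l st : List String), NR st →
    List.foldl stepB st (passA l).1 = List.foldl stepB st l
  | [], st, _ => by simp [passA]
  | [x], st, _ => by simp [passA]
  | a :: b :: t, st, h => by
    by_cases hab : a = b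
    · have hbe : (a == b) = true := beq_iff_eq.mpr hab
      rw [show passA (a :: b :: t) = ((passA t).1, true) from by simp [passA, hbe]]
      rw [passA_foldl t st h]
      subst hab
      simp only [List.foldl_cons]
      rw [stepB_stepB h]
    · have hbe : (a == b) = false := beq_eq_false_iff_ne.mpr hab
      rw [show passA (a :: b :: t) = (a :: (passA (b :: t)).1, (passA (b :: t)).2) from by
        simp [passA, hbe]]
      simp only [List.foldl_cons]
      exact passA_foldl (b :: t) (stepB st a) (stepB_chain h a)

-- a pass that found nothing returned the list unchanged, and the list is repeat-free
theorem passA_false : ∀ l : List String, (passA l).2 = false →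
    (passA l).1 = l ∧ NR l
  | [], _ => ⟨rfl, trivial⟩
  | [x], _ => ⟨rfl, trivial⟩
  | a :: b :: t, h => by
    by_cases hab : a = b
    · have hbe : (a == b) = true := beq_iff_eq.mpr hab
      rw [show (passA (a :: b :: t)).2 = true from by simp [passA, hbe]] at h
      simp at h
    · have hbe : (a == b) = false := beq_eq_false_iff_ne.mpr hab
      rw [show passA (a :: b :: t) = (a :: (passA (b :: t)).1, (passA (b :: t)).2) from by
        simp [passA, hbe]] at h ⊢
      have ih := passA_false (b :: t) h
      exact ⟨by simp [ih.1], hab, ih.2⟩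

-- folding stepB over a repeat-free word just reverses it onto the stack
theorem foldl_stepB_chain : ∀ (l st : List String), NR l →
    (∀ a ∈ l.head?, ∀ s ∈ st.head?, a ≠ s) →
    List.foldl stepB st l = l.reverse ++ st
  | [], st, _, _ => by simp
  | a :: t, st, hc, hj => by
    have hpush : stepB st a = a :: st := by
      cases st with
      | nil => simp [stepB]
      | cons s r =>
        have hne : a ≠ s := hj a (by simp) s (by simp)
        have hbe : (s == a) = false := beq_eq_false_iff_ne.mpr (fun e => hne e.symm)
        simp [stepB, hbe]
    rw [List.foldl_cons, hpush,
      foldl_stepB_chain t (a :: st) (NR_tail hc) (by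
        intro b hb s hs
        have hsa : s = a := by simpa [eq_comm] using hs
        subst hsa
        exact (NR_head hc b hb).symm)]
    simp

-- A's fixpoint loop IS the one-pass stack reduction
theorem loopA_eq_stack (l : List String) : loopA l = (List.foldl stepB [] l).reverse := by
  rw [loopA]
  by_cases hlen : l.length < 2
  · rw [if_pos hlen]
    obtain - | ⟨x, - | ⟨y, r⟩⟩ := l
    · rfl
    · rfl
    · simp at hlen
  · rw [if_neg hlen]
    by_cases hf : (passA l).2
    · rw [if_pos hf, loopA_eq_stack (passA l).1, passA_foldl l [] trivial]
    · have hff : (passA l).2 = false := by simpa using hf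
      rw [if_neg hf]
      obtain ⟨h1, h2⟩ := passA_false l hff
      rw [h1, foldl_stepB_chain l [] h2 (by simp), List.append_nil, List.reverse_reverse]
termination_by l.length
decreasing_by exact (passA_len l).2 hf

theorem loopA_nil : loopA [] = [] := by rw [loopA_eq_stack]; rfl

-- step-2 write-back loop: a key not among the written items keeps its binding …
theorem get?_ins_not_mem : ∀ (items : List (Char × List String))
    (d' : PySem.Dict Char (List String)) (p : Char), p ∉ items.map Prod.fst →
    (items.foldl (fun d kv => d.insert kv.1 (loopA kv.2)) d').get? p = d'.get? p := by
  intro items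
  induction items with
  | nil => intro d' p _; rfl
  | cons kv rest ih =>
    intro d' p hp
    simp only [List.map_cons, List.mem_cons, not_or] at hp
    rw [List.foldl_cons, ih _ p hp.2, PySem.Dict.get?_insert_of_ne _ _ hp.1]

-- … and a written key holds the simplified value
theorem get?_ins_mem : ∀ (items : List (Char × List String))
    (d' : PySem.Dict Char (List String)), (items.map Prod.fst).Nodup →
    ∀ {k : Char} {v : List String}, (k, v) ∈ items →
    (items.foldl (fun d kv => d.insert kv.1 (loopA kv.2)) d').get? k = some (loopA v) := by
  intro items
  induction items with
  | nil => intro d' _ k v hmem; simp at hmem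
  | cons kv rest ih =>
    intro d' hnd k v hmem
    simp only [List.map_cons, List.nodup_cons] at hnd
    rw [List.foldl_cons]
    rcases List.mem_cons.mp hmem with heq | hmemr
    · obtain ⟨h1, h2⟩ : kv.1 = k ∧ kv.2 = v := by rw [← heq]; exact ⟨rfl, rfl⟩
      subst h1
      subst h2
      rw [get?_ins_not_mem rest _ kv.1 hnd.1, PySem.Dict.get?_insert_self]
    · exact ih _ hnd.2 hmemr

theorem getD_after (dg : PySem.Dict Char (List String)) (hnd : dg.keys.Nodup) (p : Char) :
    (dg.items.foldl (fun d kv => d.insert kv.1 (loopA kv.2)) dg).getD p []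
      = loopA (dg.getD p []) := by
  have hkeq : dg.keys = dg.items.map Prod.fst := by simp [PySem.Dict.keys]
  by_cases hp : p ∈ dg.keys
  · obtain ⟨v, hv⟩ : ∃ v, (p, v) ∈ dg.items := by
      rw [hkeq] at hp
      rcases List.mem_map.mp hp with ⟨kv, hkv, hfst⟩
      exact ⟨kv.2, by rw [← hfst]; simpa using hkv⟩
    have hget : dg.get? p = some v := PySem.Dict.get?_of_mem_items _ hv hnd
    have hnd' : (dg.items.map Prod.fst).Nodup := by rw [← hkeq]; exact hnd
    rw [PySem.Dict.getD_eq_get?_getD, get?_ins_mem dg.items dg hnd' hv,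
      PySem.Dict.getD_of_get?_eq_some _ _ hget]
    rfl
  · have hne : dg.get? p = none := (PySem.Dict.get?_eq_none_iff_not_mem_keys _ _).mpr hp
    have hnotm : p ∉ dg.items.map Prod.fst := by rw [← hkeq]; exact hp
    rw [PySem.Dict.getD_eq_get?_getD, get?_ins_not_mem _ _ _ hnotm, hne,
      PySem.Dict.getD_eq_get?_getD, hne]
    simp [loopA_nil]

-- adding only already-present elements leaves a set unchanged
theorem set_update_mem : ∀ (xs s : List Char), (∀ x ∈ xs, x ∈ s) →
    PySem.Set.update s xs = s := by
  intro xs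
  induction xs with
  | nil => intro s _; rfl
  | cons x rest ih =>
    intro s h
    have hadd : PySem.Set.add s x = s := by
      simp [PySem.Set.add, PySem.Set.contains, h x (by simp)]
    have hstep : PySem.Set.update s (x :: rest) = PySem.Set.update (PySem.Set.add s x) rest := by
      simp [PySem.Set.update]
    rw [hstep, hadd]
    exact ih s (fun y hy => h y (by simp [hy]))

-- B's skip-guard over all ops IS the stack fold over the party's filtered ops
theorem guard_eq (party : Char) (ops : List String) :
    ops.foldl (fun st t => if partyOf t != party then st else stepB st t) [] =
    (ops.filter (fun t => partyOf t == party)).foldl stepB [] := by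
  have h : ∀ (st : List String) (t : String),
      (if partyOf t != party then st else stepB st t)
        = (if (partyOf t == party) = true then stepB st t else st) := by
    intro st t
    cases hpt : partyOf t == party <;> simp [bne, hpt]
  exact (PySem.List.foldl_congr_mem (l := ops) (init := ([] : List String))
      (f := fun st t => if partyOf t != party then st else stepB st t)
      (g := fun st t => if (partyOf t == party) = true then stepB st t else st)
      (fun acc x _ => h acc x)).trans
    (PySem.List.foldl_if_eq_foldl_filter (fun t => partyOf t == party) stepB ops [])

-- the per-combo simplification: A's dict + fixpoint rescans = B's sorted parties + stack pass
theorem simplify_eq (combo : List String) :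
    simplify_product_advanced (PySem.Str.join " " combo) = simplifyB combo := by
  simp only [simplify_product_advanced, simplifyB]
  set ops := (PySem.Str.split₀ (PySem.Str.join " " combo)).filter (fun t => t != "Id") with hops
  by_cases hnil : ops = []
  · rw [if_pos hnil, hnil]
    rfl
  · rw [if_neg hnil]
    set dg := ops.foldl (fun d op => d.modify (partyOf op) [] (fun v => v ++ [op]))
      PySem.Dict.empty with hdg
    set d2 := dg.items.foldl (fun d kv => d.insert kv.1 (loopA kv.2)) dg with hd2
    have hnd : dg.keys.Nodup := by
      rw [hdg]
      exact PySem.Dict.nodup_keys_foldl_modify_key ops partyOf []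
        (fun _ op => fun v => v ++ [op]) PySem.Dict.empty PySem.Dict.nodup_keys_empty
    have hkeys : dg.keys = PySem.Set.ofList (ops.map partyOf) := by
      rw [hdg, PySem.Dict.keys_foldl_modify_key, PySem.Dict.keys_empty,
        PySem.Set.ofList_eq_foldl]
      simp [PySem.Set.update]
    have hfilter : ∀ p : Char, dg.getD p [] = ops.filter (fun t => partyOf t == p) := by
      intro p
      rw [hdg, show (ops.foldl (fun d op => d.modify (partyOf op) [] (fun v => v ++ [op]))
            PySem.Dict.empty)
          = ((ops.map (fun op => (partyOf op, op))).foldl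
            (fun d pr => d.modify pr.1 [] (fun v => v ++ [pr.2])) PySem.Dict.empty) from by
        rw [List.foldl_map]]
      rw [PySem.Dict.getD_foldl_modify_append, PySem.Dict.getD_empty, List.filter_map]
      simp [Function.comp_def]
    have hgd2 : ∀ p : Char, d2.getD p [] = loopA (dg.getD p []) := fun p => by
      rw [hd2]; exact getD_after dg hnd p
    have hk2 : d2.keys = dg.keys := by
      rw [hd2, PySem.Dict.keys_foldl_insert_key dg.items Prod.fst (fun d kv => loopA kv.2) dg]
      apply set_update_mem
      intro x hx
      simpa [PySem.Dict.keys] using hx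
    rw [PySem.List.foldl_append_eq_flatMap, PySem.List.foldl_append_eq_flatMap, hk2, hkeys]
    have hfun : (fun p => d2.getD p [])
        = (fun party => (ops.foldl
            (fun st t => if partyOf t != party then st else stepB st t) []).reverse) := by
      funext p
      rw [hgd2 p, hfilter p, loopA_eq_stack, guard_eq p ops]
    rw [hfun]

theorem buildPools_some (d : PySem.Dict String (List String)) : ∀ cs : List Char,
    cs.all (fun c => d.contains (String.ofList [c])) = true →
    buildPools d cs = some (cs.map (fun c => d.getD (String.ofList [c]) [])) := by
  intro cs
  induction cs with
  | nil => intro _; rfl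
  | cons c rest ih =>
    intro h
    simp only [List.all_cons, Bool.and_eq_true] at h
    obtain ⟨pool, hp⟩ : ∃ pool, d.get? (String.ofList [c]) = some pool := by
      have hc := h.1
      rw [PySem.Dict.contains_eq_isSome_get?] at hc
      exact Option.isSome_iff_exists.mp hc
    have hgd : d.getD (String.ofList [c]) [] = pool := PySem.Dict.getD_of_get?_eq_some _ _ hp
    simp [buildPools, hp, ih h.2, hgd]

theorem buildPools_none (d : PySem.Dict String (List String)) : ∀ cs : List Char,
    cs.all (fun c => d.contains (String.ofList [c])) = false →
    buildPools d cs = none := by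
  intro cs
  induction cs with
  | nil => intro h; simp at h
  | cons c rest ih =>
    intro h
    simp only [List.all_cons, Bool.and_eq_false_iff] at h
    rcases h with hc | hrest
    · have hn : d.get? (String.ofList [c]) = none := by
        rw [PySem.Dict.contains_eq_isSome_get?] at hc
        exact Option.not_isSome_iff_eq_none.mp (by simp [hc])
      simp [buildPools, hn]
    · cases hg : d.get? (String.ofList [c]) with
      | none => simp [buildPools, hg]
      | some pool => simp [buildPools, hg, ih hrest]

-- B's left-to-right combo extension builds exactly itertools.product of the pools
theorem combos_eq (d : PySem.Dict String (List String)) :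
    ∀ (cs : List Char) (acc : List (List String)),
    cs.foldl (fun cs' c => cs'.flatMap
        (fun pc => (d.getD (String.ofList [c]) []).map (fun op => pc ++ [op]))) acc
      = acc.flatMap (fun pc =>
          (pyProd (cs.map (fun c => d.getD (String.ofList [c]) []))).map (fun c2 => pc ++ c2))
  | [], acc => by simp [pyProd]
  | c :: cs, acc => by
    rw [List.foldl_cons, combos_eq d cs _]
    simp only [List.map_cons, pyProd]
    rw [List.flatMap_assoc]
    congr 1
    funext pc
    rw [List.flatMap_map, List.map_flatMap]
    simp [List.map_map, Function.comp_def, List.append_assoc]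

-- ===== VERDICT (by name: the statement is the Claim_ definition above) =====
theorem generate_string_term_set_spec : Claim_equal_generate_string_term_set := by
  intro base t _
  unfold Spec_generate_string_term_set
  simp only [generate_string_term_set, generate_string_term_set_alt]
  set d := PySem.Dict.mk base with hd
  by_cases hall : t.toList.all (fun c => d.contains (String.ofList [c])) = true
  · rw [if_pos hall, buildPools_some d t.toList hall]
    dsimp only
    rw [combos_eq d t.toList [[]]]
    simp only [List.flatMap_cons, List.flatMap_nil, List.append_nil, List.nil_append,
      List.map_id']
    rw [PySem.Set.ofList_eq_foldl, List.foldl_map]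
    exact PySem.List.foldl_congr_mem
      (l := pyProd (t.toList.map (fun c => d.getD (String.ofList [c]) [])))
      (init := PySem.Set.empty)
      (f := fun s combo => PySem.Set.add s (simplify_product_advanced (PySem.Str.join " " combo)))
      (g := fun s combo => PySem.Set.add s (simplifyB combo))
      (fun acc x _ => by simp only [simplify_eq])
  · rw [if_neg hall, buildPools_none d t.toList (by simpa using hall)]
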